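-- pv_equiv track=rewrite | github.com/AlbertVeli/AdventOfCode | 2023/12/12_1.py | get_group_combinations
-- ===== SOURCE A (Python) =====
-- from itertools import product
--
-- bintochar = { 0: '.', 1: '#' }
--
-- def get_group_combinations(s):
--     ixs = [i for i, c in enumerate(s) if c == '?']
--     n = len(ixs)
--     if n == 0:
--         return [s]
--     combs = []
--     for t in product((0, 1), repeat = n):
--         # rs = replaced string
--         rs = s
--         for i, digit in enumerate(t):
--             ix = ixs[i]
--             rs = rs[:ix] + bintochar[digit] + rs[ix+1:]
--         combs.append(rs)
--     return combs
-- ===== SOURCE B (Python) =====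
-- def get_group_combinations(s):
--     # Build all fillings incrementally: one left-to-right pass over s,
--     # extending every partial string; '?' fans out to '.' then '#'
--     # (so the first '?' stays most significant, matching product order).
--     result = ['']
--     for ch in s:
--         if ch == '?':
--             result = [p + c for p in result for c in '.#']
--         else:
--             result = [p + ch for p in result]
--     return result
-- ===== Notes on version B (the rewrite author's own statement) =====
-- stated objective: simpler
-- what changed: Replaces enumeration of 0/1 index tuples with per-tuple slice-based reconstruction by a single left-to-right pass that extends a list of partial strings, fanning out on each '?' ('.' before '#').
import Mathlib
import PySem

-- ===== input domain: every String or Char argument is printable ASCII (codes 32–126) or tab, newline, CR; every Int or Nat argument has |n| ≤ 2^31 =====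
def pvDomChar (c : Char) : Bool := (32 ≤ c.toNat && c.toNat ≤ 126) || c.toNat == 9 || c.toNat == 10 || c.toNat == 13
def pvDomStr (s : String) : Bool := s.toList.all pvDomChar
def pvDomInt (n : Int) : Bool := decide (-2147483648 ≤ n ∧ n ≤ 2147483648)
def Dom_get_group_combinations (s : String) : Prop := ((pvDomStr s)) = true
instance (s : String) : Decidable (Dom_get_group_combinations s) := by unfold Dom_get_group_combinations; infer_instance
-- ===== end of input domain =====

-- B replaces A's enumeration of 0/1 tuples (reassembled per tuple by string slicing)
-- with one left-to-right pass extending partial strings; objective: simpler.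

-- ===== PORT A =====
-- itertools.product((0, 1), repeat = n), tuples in lexicographic order (first slot slowest)
def pvProd01 : Nat → List (List Int)
  | 0 => [[]]
  | n + 1 => ([0, 1] : List Int).flatMap (fun d => (pvProd01 n).map (fun t => d :: t))

-- bintochar = { 0: '.', 1: '#' } ; digit is always 0 or 1, so the default is never used
def pvBintochar (d : Int) : Char :=
  PySem.Dict.getD (PySem.Dict.ofList [((0 : Int), '.'), (1, '#')]) d '.'

def get_group_combinations (s : String) : List String :=
  let cs := s.toList
  let ixs : List Int := ((PySem.List.enumerate cs 0).filter (fun p => p.2 == '?')).map (fun p => p.1)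
  let n := ixs.length
  if n = 0 then [s]
  else
    (pvProd01 n).foldl (fun combs t =>
      let rs := (PySem.List.enumerate t 0).foldl
        (fun rs p =>
          -- ix = ixs[i]; i is always in range (len(t) = len(ixs)), so pyGetD is exact here
          let ix := PySem.List.pyGetD ixs p.1 0
          PySem.List.slice rs none (some ix) ++ [pvBintochar p.2] ++ PySem.List.slice rs (some (ix + 1)) none)
        cs
      combs ++ [String.ofList rs]) []

-- ===== PORT B =====
def get_group_combinations_alt (s : String) : List String :=
  s.toList.foldl
    (fun result ch =>
      if ch == '?' then result.flatMap (fun p => ".#".toList.map (fun c => p.push c))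
      else result.map (fun p => p.push ch))
    [""]

-- ===== PRECONDITION & SPEC =====
def Spec_get_group_combinations (s : String) (out : List String) : Prop := out = get_group_combinations_alt s
instance (s : String) (out : List String) : Decidable (Spec_get_group_combinations s out) := by unfold Spec_get_group_combinations; infer_instance

-- ===== CLAIM (what is proved, stated in full; the proofs are below) =====
def Claim_equal_get_group_combinations : Prop := ∀ (s : String), Dom_get_group_combinations s → Spec_get_group_combinations s (get_group_combinations s)

-- ===== LEMMAS AND PROOFS =====

-- canonical expansion of a char list: all fillings of '?', first '?' most significant
def pvExpand : List Char → List (List Char)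
  | [] => [[]]
  | c :: cs =>
      if c = '?' then (pvExpand cs).map ('.' :: ·) ++ (pvExpand cs).map ('#' :: ·)
      else (pvExpand cs).map (c :: ·)

-- positions of '?' starting at offset k
def pvQpos : List Char → Int → List Int
  | [], _ => []
  | c :: cs, k => if c = '?' then k :: pvQpos cs (k + 1) else pvQpos cs (k + 1)

-- one slice-substitution step of A's inner loop
def pvSubstOne (rs : List Char) (ix : Int) (ch : Char) : List Char :=
  PySem.List.slice rs none (some ix) ++ [ch] ++ PySem.List.slice rs (some (ix + 1)) none

def pvSubstZip (rs : List Char) (pairs : List (Int × Int)) : List Char :=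
  pairs.foldl (fun rs p => pvSubstOne rs p.1 (pvBintochar p.2)) rs

theorem pvBintochar_zero : pvBintochar 0 = '.' := by decide
theorem pvBintochar_one : pvBintochar 1 = '#' := by decide

theorem push_ofList (l : List Char) (c : Char) :
    String.push (String.ofList l) c = String.ofList (l ++ [c]) := by
  apply String.toList_injective; simp

-- ixs as computed by port A equals pvQpos
theorem pvQpos_eq (cs : List Char) (k : Int) :
    ((PySem.List.enumerate cs k).filter (fun p => p.2 == '?')).map (fun p => p.1) = pvQpos cs k := by
  induction cs generalizing k with
  | nil => simp [PySem.List.enumerate_nil, pvQpos]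
  | cons c cs ih =>
      rw [PySem.List.enumerate_cons]
      by_cases h : c = '?' <;> simp [pvQpos, h, ih]

theorem pvQpos_shift (cs : List Char) (k : Int) :
    pvQpos cs (k + 1) = (pvQpos cs k).map (· + 1) := by
  induction cs generalizing k with
  | nil => simp [pvQpos]
  | cons c cs ih =>
      by_cases h : c = '?' <;> simp [pvQpos, h, ih]

theorem pvQpos_nonneg (cs : List Char) (k : Int) (hk : 0 ≤ k) :
    ∀ i ∈ pvQpos cs k, k ≤ i := by
  induction cs generalizing k with
  | nil => simp [pvQpos]
  | cons c cs ih =>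
      intro i hi
      by_cases h : c = '?' <;> simp [pvQpos, h] at hi
      · rcases hi with rfl | hi
        · exact le_refl _
        · exact le_trans (by omega) (ih (k + 1) (by omega) i hi)
      · exact le_trans (by omega) (ih (k + 1) (by omega) i hi)

theorem pvSubstOne_zero (rs : List Char) (c ch : Char) :
    pvSubstOne (c :: rs) 0 ch = ch :: rs := by
  have h1 : (0:Int) + 1 = 1 := by omega
  rw [pvSubstOne, h1, PySem.List.slice_to (c :: rs) (le_refl (0:Int)),
      PySem.List.slice_from (c :: rs) (by omega : (0:Int) ≤ 1)]
  simp

theorem pvSubstOne_cons (rs : List Char) (c ch : Char) (ix : Int) (h : 1 ≤ ix) :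
    pvSubstOne (c :: rs) ix ch = c :: pvSubstOne rs (ix - 1) ch := by
  have h0 : (0:Int) ≤ ix := by omega
  have h1 : (0:Int) ≤ ix - 1 := by omega
  simp only [pvSubstOne, PySem.List.slice_to (c :: rs) h0, PySem.List.slice_to rs h1,
    PySem.List.slice_from (c :: rs) (by omega : (0:Int) ≤ ix + 1),
    PySem.List.slice_from rs (by omega : (0:Int) ≤ ix - 1 + 1)]
  have hx : ix.toNat = (ix - 1).toNat + 1 := by omega
  have hy : (ix + 1).toNat = (ix - 1 + 1).toNat + 1 := by omega
  rw [hx, hy]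
  simp

theorem pvSubstZip_cons (pairs : List (Int × Int)) (rs : List Char) (c : Char)
    (h : ∀ p ∈ pairs, 1 ≤ p.1) :
    pvSubstZip (c :: rs) pairs = c :: pvSubstZip rs (pairs.map (fun p => (p.1 - 1, p.2))) := by
  induction pairs generalizing rs with
  | nil => simp [pvSubstZip]
  | cons p ps ih =>
      simp only [pvSubstZip, List.foldl_cons, List.map_cons]
      rw [pvSubstOne_cons rs c _ p.1 (h p (by simp))]
      exact ih _ (fun q hq => h q (by simp [hq]))

theorem pvProd01_length (n : Nat) : ∀ t ∈ pvProd01 n, t.length = n := by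
  induction n with
  | zero => simp [pvProd01]
  | succ n ih =>
      intro t ht
      simp [pvProd01] at ht
      rcases ht with ⟨t', ht', rfl⟩ | ⟨t', ht', rfl⟩ <;> simp [ih t' ht']

-- A's inner fold over enumerate+indexing equals the zip form
theorem pvFoldE (t : List Int) : ∀ (ixs0 ixs : List Int) (rs : List Char),
    t.length = ixs.length →
    (PySem.List.enumerate t (ixs0.length : Int)).foldl
      (fun rs p => pvSubstOne rs (PySem.List.pyGetD (ixs0 ++ ixs) p.1 0) (pvBintochar p.2)) rs
    = pvSubstZip rs (ixs.zip t) := by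
  induction t with
  | nil => intro ixs0 ixs rs h; simp [PySem.List.enumerate_nil, pvSubstZip]
  | cons d t ih =>
      intro ixs0 ixs rs h
      cases ixs with
      | nil => simp at h
      | cons i ixs' =>
          rw [PySem.List.enumerate_cons]
          simp only [List.foldl_cons]
          have hget : PySem.List.pyGetD (ixs0 ++ i :: ixs') (ixs0.length : Int) 0 = i := by
            rw [PySem.List.pyGetD_natCast]
            simp [List.getD_eq_getElem?_getD]
          rw [hget]
          have := ih (ixs0 ++ [i]) ixs' (pvSubstOne rs i (pvBintochar d)) (by simpa using h)
          simp only [List.append_assoc, List.cons_append, List.nil_append] at this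
          have harg : ((ixs0.length : Int) + 1) = ((ixs0 ++ [i]).length : Int) := by simp
          rw [harg, this]
          simp [pvSubstZip]

-- main A-side lemma
theorem pvShiftZip (cs : List Char) (c : Char) (t : List Int) :
    pvSubstZip (c :: cs) (((pvQpos cs 0).map (· + 1)).zip t)
    = c :: pvSubstZip cs ((pvQpos cs 0).zip t) := by
  have hge : ∀ p ∈ ((pvQpos cs 0).map (· + 1)).zip t, 1 ≤ p.1 := by
    intro p hp
    rcases List.of_mem_zip hp with ⟨hl, _⟩
    simp only [List.mem_map] at hl
    rcases hl with ⟨i, hi, hEq⟩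
    have := pvQpos_nonneg cs 0 (le_refl 0) i hi
    omega
  rw [pvSubstZip_cons _ _ _ hge, List.zip_map_left, List.map_map]
  have hid : ((fun p : Int × Int => (p.1 - 1, p.2)) ∘ Prod.map (· + 1) id) = id := by
    funext p; cases p; simp [Prod.map]
  rw [hid, List.map_id]

theorem pvMain (cs : List Char) :
    (pvProd01 (pvQpos cs 0).length).map (fun t => pvSubstZip cs ((pvQpos cs 0).zip t)) = pvExpand cs := by
  induction cs with
  | nil => simp [pvQpos, pvProd01, pvSubstZip, pvExpand]
  | cons c cs ih =>
      have hshift : pvQpos cs 1 = (pvQpos cs 0).map (· + 1) := by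
        have := pvQpos_shift cs 0; simpa using this
      by_cases h : c = '?'
      · subst h
        have hq : pvQpos ('?' :: cs) 0 = 0 :: (pvQpos cs 0).map (· + 1) := by
          simp [pvQpos, hshift]
        rw [hq]
        have hlen : (0 :: (pvQpos cs 0).map (· + 1) : List Int).length
            = (pvQpos cs 0).length + 1 := by simp
        rw [hlen]
        have hprod : pvProd01 ((pvQpos cs 0).length + 1)
            = (pvProd01 (pvQpos cs 0).length).map ((0 : Int) :: ·)
              ++ (pvProd01 (pvQpos cs 0).length).map ((1 : Int) :: ·) := by
          simp [pvProd01]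
        rw [hprod, List.map_append, List.map_map, List.map_map]
        have key : ∀ d : Int,
            ((fun t => pvSubstZip ('?' :: cs) ((0 :: (pvQpos cs 0).map (· + 1)).zip t)) ∘ (d :: ·))
            = (fun t => pvBintochar d :: pvSubstZip cs ((pvQpos cs 0).zip t)) := by
          intro d
          funext t
          simp only [Function.comp, List.zip_cons_cons, pvSubstZip, List.foldl_cons]
          rw [show pvSubstOne ('?' :: cs) (0 : Int) (pvBintochar d) = pvBintochar d :: cs from
            pvSubstOne_zero cs '?' _]
          exact pvShiftZip cs (pvBintochar d) t
        rw [key 0, key 1]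
        have hexp : pvExpand ('?' :: cs)
            = (pvExpand cs).map ('.' :: ·) ++ (pvExpand cs).map ('#' :: ·) := by
          simp [pvExpand]
        rw [hexp, ← ih, List.map_map, List.map_map]
        simp only [pvBintochar_zero, pvBintochar_one]
        rfl
      · have hq : pvQpos (c :: cs) 0 = (pvQpos cs 0).map (· + 1) := by
          simp [pvQpos, h, hshift]
        rw [hq, List.length_map]
        have key : (fun t => pvSubstZip (c :: cs) (((pvQpos cs 0).map (· + 1)).zip t))
            = (fun t => c :: pvSubstZip cs ((pvQpos cs 0).zip t)) := by
          funext t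
          exact pvShiftZip cs c t
        rw [key]
        have hexp : pvExpand (c :: cs) = (pvExpand cs).map (c :: ·) := by
          simp [pvExpand, h]
        rw [hexp, ← ih, List.map_map]
        rfl

theorem pvExpand_no_q (cs : List Char) (k : Int) (h : pvQpos cs k = []) : pvExpand cs = [cs] := by
  induction cs generalizing k with
  | nil => simp [pvExpand]
  | cons c cs ih =>
      by_cases hc : c = '?'
      · simp [pvQpos, hc] at h
      · simp only [pvQpos, if_neg hc] at h
        simp [pvExpand, if_neg hc, ih (k + 1) h]

-- B-side: the list-level step function
def pvStepL (R : List (List Char)) (ch : Char) : List (List Char) :=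
  if ch == '?' then R.flatMap (fun p => ['.', '#'].map (fun c => p ++ [c]))
  else R.map (fun p => p ++ [ch])

theorem pvFoldB (l : List Char) : ∀ R : List (List Char),
    l.foldl pvStepL R = R.flatMap (fun p => (pvExpand l).map (p ++ ·)) := by
  induction l with
  | nil => intro R; simp [pvExpand]
  | cons c cs ih =>
      intro R
      simp only [List.foldl_cons, ih (pvStepL R c)]
      by_cases h : c = '?'
      · subst h
        have hexp : pvExpand ('?' :: cs)
            = (pvExpand cs).map ('.' :: ·) ++ (pvExpand cs).map ('#' :: ·) := by
          simp [pvExpand]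
        rw [hexp]
        simp only [pvStepL, beq_self_eq_true, if_pos, List.flatMap_assoc]
        congr 1
        funext p
        simp only [List.map_cons, List.map_nil, List.flatMap_cons, List.flatMap_nil,
          List.append_nil, List.map_append, List.map_map]
        congr 1 <;> · congr 1; funext r; simp
      · have hexp : pvExpand (c :: cs) = (pvExpand cs).map (c :: ·) := by
          simp [pvExpand, h]
        rw [hexp]
        simp only [pvStepL, beq_iff_eq, if_neg h]
        rw [List.flatMap_map]
        congr 1
        funext p
        rw [List.map_map]
        congr 1
        funext r
        simp

-- bridge B's String fold to the list-level fold
theorem pvFoldB_str (l : List Char) : ∀ R : List (List Char),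
    l.foldl (fun result ch =>
      if ch == '?' then result.flatMap (fun p => ".#".toList.map (fun c => p.push c))
      else result.map (fun p => p.push ch)) (R.map String.ofList)
    = (l.foldl pvStepL R).map String.ofList := by
  have hdot : ".#".toList = ['.', '#'] := by decide
  induction l with
  | nil => intro R; simp
  | cons c cs ih =>
      intro R
      simp only [List.foldl_cons]
      have hstep : (if c == '?' then (R.map String.ofList).flatMap (fun p => ".#".toList.map (fun ch => p.push ch))
          else (R.map String.ofList).map (fun p => p.push c))
          = (pvStepL R c).map String.ofList := by
        by_cases h : c = '?'
        · subst h
          simp only [beq_self_eq_true, if_pos, pvStepL, hdot]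
          rw [List.flatMap_map, List.map_flatMap]
          congr 1
          funext p
          simp [push_ofList]
        · simp only [pvStepL, beq_iff_eq, if_neg h, List.map_map]
          congr 1
          funext p
          simp [push_ofList]
      rw [hstep, ih]

-- ===== VERDICT (by name: the statement is the Claim_ definition above) =====
theorem get_group_combinations_spec : Claim_equal_get_group_combinations := by
  intro s _
  unfold Spec_get_group_combinations get_group_combinations get_group_combinations_alt
  have hB := pvFoldB_str s.toList [[]]
  simp only [List.map_cons, List.map_nil] at hB
  have hB' : String.ofList ([] : List Char) = "" := rfl
  rw [hB'] at hB
  rw [hB, pvFoldB s.toList [[]]]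
  simp only [List.flatMap_cons, List.flatMap_nil, List.append_nil]
  have hix := pvQpos_eq s.toList 0
  simp only [hix]
  by_cases hn : (pvQpos s.toList 0).length = 0
  · rw [if_pos hn]
    have hnil : pvQpos s.toList 0 = [] := List.length_eq_zero_iff.mp hn
    rw [pvExpand_no_q s.toList 0 hnil]
    simp
  · rw [if_neg hn]
    have hfold : ∀ (acc : List String),
        (pvProd01 (pvQpos s.toList 0).length).foldl (fun combs t =>
          combs ++ [String.ofList ((PySem.List.enumerate t 0).foldl
            (fun rs p => PySem.List.slice rs none (some (PySem.List.pyGetD (pvQpos s.toList 0) p.1 0)) ++ [pvBintochar p.2] ++ PySem.List.slice rs (some (PySem.List.pyGetD (pvQpos s.toList 0) p.1 0 + 1)) none)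
            s.toList)]) acc
        = acc ++ (pvProd01 (pvQpos s.toList 0).length).map (fun t =>
            String.ofList ((PySem.List.enumerate t 0).foldl
              (fun rs p => PySem.List.slice rs none (some (PySem.List.pyGetD (pvQpos s.toList 0) p.1 0)) ++ [pvBintochar p.2] ++ PySem.List.slice rs (some (PySem.List.pyGetD (pvQpos s.toList 0) p.1 0 + 1)) none)
              s.toList)) := by
      intro acc
      exact PySem.List.foldl_append_singleton_eq_map _ _ _
    rw [hfold []]
    simp only [List.nil_append]
    rw [← pvMain s.toList]
    rw [List.map_map, List.map_map]
    apply List.map_congr_left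
    intro t ht
    have hlen : t.length = (pvQpos s.toList 0).length := pvProd01_length _ t ht
    have := pvFoldE t [] (pvQpos s.toList 0) s.toList hlen
    simp only [List.length_nil, Nat.cast_zero, List.nil_append] at this
    simp only [Function.comp]
    rw [← this]
    rfl
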